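-- pv_equiv track=rewrite | github.com/putetrekk/maestro-net | transformer_v2/utils.py | split_input_output
-- ===== SOURCE A (Python) =====
-- def split_input_output(all_data: list, words_per_section=75):
-- 	inputs, outputs = [], []
-- 	for data in all_data:
-- 		sep = ' '
-- 		sectioned_notes = []
--
-- 		groups = data.split(sep)
-- 		while len(groups):
-- 			sectioned_notes.append(sep.join(groups[:words_per_section]))
-- 			groups = groups[words_per_section:]
--
-- 		for i in range(len(sectioned_notes) - 1):
-- 			inputs.append(sectioned_notes[i])
-- 			outputs.append(sectioned_notes[i + 1])
--
-- 	return inputs, outputs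
-- ===== SOURCE B (Python) =====
-- def split_input_output(all_data: list, words_per_section=75):
-- 	inputs, outputs = [], []
-- 	for data in all_data:
-- 		words = data.split(' ')
-- 		n = len(words)
-- 		prev = ' '.join(words[:words_per_section])
-- 		i = words_per_section
-- 		while i < n:
-- 			cur = ' '.join(words[i:i + words_per_section])
-- 			inputs.append(prev)
-- 			outputs.append(cur)
-- 			prev = cur
-- 			i += words_per_section
-- 	return inputs, outputs
-- ===== Notes on version B (the rewrite author's own statement) =====
-- stated objective: faster
-- what changed: Instead of repeatedly re-slicing the tail of the word list (groups = groups[w:], recopying the remainder each round) and then a second pass pairing sections, B walks the word list once with an index stepping by words_per_section, slicing each section directly and emitting (previous, current) pairs on the fly; intended as asymptotically faster, a timing run measured 1.9-2.4x on its generated inputs.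
import Mathlib
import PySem

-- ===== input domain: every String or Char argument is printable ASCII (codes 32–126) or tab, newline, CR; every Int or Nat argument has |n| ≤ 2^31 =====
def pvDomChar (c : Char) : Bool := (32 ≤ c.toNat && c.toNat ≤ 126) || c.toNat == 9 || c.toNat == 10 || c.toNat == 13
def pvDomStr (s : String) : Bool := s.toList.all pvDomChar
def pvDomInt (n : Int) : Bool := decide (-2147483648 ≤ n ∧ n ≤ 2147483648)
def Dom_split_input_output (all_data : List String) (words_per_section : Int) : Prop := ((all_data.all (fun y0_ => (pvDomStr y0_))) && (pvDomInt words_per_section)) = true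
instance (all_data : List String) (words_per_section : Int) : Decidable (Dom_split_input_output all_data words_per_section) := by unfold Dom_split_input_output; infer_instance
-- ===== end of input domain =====

-- B replaces A's tail re-slicing (groups = groups[w:]) plus second pairing pass by one index-stepping pass per
-- text that pairs sections as they are produced; intended as faster (measured 1.9-2.4x in a timing run).

-- ===== PORT A =====
-- the 'while len(groups): sectioned_notes.append(' '.join(groups[:w])); groups = groups[w:]' loop;
-- fuel = initial groups length + 1 is only a termination guard (with w ≥ 1, from Pre_, each round shortens groups)
def pvAsect (w : Int) : Nat → List String → List String
  | 0, _ => []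
  | fuel + 1, groups =>
    if groups.length ≠ 0 then
      PySem.Str.join " " (PySem.List.slice groups none (some w)) ::
        pvAsect w fuel (PySem.List.slice groups (some w) none)
    else []

def split_input_output (all_data : List String) (words_per_section : Int) : List String × List String :=
  all_data.foldl
    (fun acc data =>
      let groups := (PySem.Str.split? data " ").getD []
      let sectioned_notes := pvAsect words_per_section (groups.length + 1) groups
      (PySem.List.pyRange 0 ((sectioned_notes.length : Int) - 1) 1).foldl
        (fun acc i =>
          (acc.1 ++ [PySem.List.pyGetD sectioned_notes i ""],
           acc.2 ++ [PySem.List.pyGetD sectioned_notes (i + 1) ""]))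
        acc)
    ([], [])

-- ===== PORT B =====
-- the 'i = w; while i < n: cur = ' '.join(words[i:i+w]); append pair; prev = cur; i += w' loop;
-- fuel = words length is only a termination guard (with w ≥ 1 the loop runs at most n times)
def pvBloop (w : Int) (words : List String) : Nat → Int → String → List String × List String → List String × List String
  | 0, _, _, acc => acc
  | fuel + 1, i, prev, acc =>
    if i < (words.length : Int) then
      let cur := PySem.Str.join " " (PySem.List.slice words (some i) (some (i + w)))
      pvBloop w words fuel (i + w) cur (acc.1 ++ [prev], acc.2 ++ [cur])
    else acc

def split_input_output_alt (all_data : List String) (words_per_section : Int) : List String × List String :=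
  all_data.foldl
    (fun acc data =>
      let words := (PySem.Str.split? data " ").getD []
      let prev := PySem.Str.join " " (PySem.List.slice words none (some words_per_section))
      pvBloop words_per_section words words.length words_per_section prev acc)
    ([], [])

-- ===== PRECONDITION & SPEC =====
-- Pre_ excludes only words_per_section ≤ 0 with a nonempty all_data: there both Python loops never
-- terminate (A keeps appending without shortening groups), so A returns no value.
def Pre_split_input_output (all_data : List String) (words_per_section : Int) : Prop :=
  1 ≤ words_per_section ∨ all_data = []
instance (all_data : List String) (words_per_section : Int) : Decidable (Pre_split_input_output all_data words_per_section) := by unfold Pre_split_input_output; infer_instance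
def pvWitness_split_input_output : List String × Int := (["a b c d e", "x y"], 2)

def Spec_split_input_output (all_data : List String) (words_per_section : Int) (out : List String × List String) : Prop := out = split_input_output_alt all_data words_per_section
instance (all_data : List String) (words_per_section : Int) (out : List String × List String) : Decidable (Spec_split_input_output all_data words_per_section out) := by unfold Spec_split_input_output; infer_instance

-- ===== CLAIM (what is proved, stated in full; the proofs are below) =====
def Claim_equal_split_input_output : Prop := ∀ (all_data : List String) (words_per_section : Int), Dom_split_input_output all_data words_per_section → Pre_split_input_output all_data words_per_section → Spec_split_input_output all_data words_per_section (split_input_output all_data words_per_section)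

-- ===== LEMMAS AND PROOFS =====

theorem pvAsect_nil (w : Int) (f : Nat) : pvAsect w f [] = [] := by
  cases f <;> simp [pvAsect]

-- fuel irrelevance: with w ≥ 1 any fuel ≥ the list length computes the sections
theorem pvAsect_fuel (w : Int) (hw : 1 ≤ w) :
    ∀ (f1 : Nat) (xs : List String) (f2 : Nat), xs.length ≤ f1 → xs.length ≤ f2 →
      pvAsect w f1 xs = pvAsect w f2 xs := by
  intro f1
  induction f1 with
  | zero =>
    intro xs f2 h1 _
    have : xs = [] := List.eq_nil_of_length_eq_zero (by omega)
    subst this; simp [pvAsect_nil]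
  | succ f ih =>
    intro xs f2 h1 h2
    by_cases hxs : xs = []
    · subst hxs; simp [pvAsect_nil]
    · have hlen : 1 ≤ xs.length := List.length_pos_of_ne_nil hxs
      obtain ⟨f2', rfl⟩ : ∃ f2', f2 = f2' + 1 := ⟨f2 - 1, by omega⟩
      have hwnat : 1 ≤ w.toNat := by omega
      have hdrop : (PySem.List.slice xs (some w) none).length ≤ f ∧
          (PySem.List.slice xs (some w) none).length ≤ f2' := by
        rw [PySem.List.slice_from xs (by omega : (0:Int) ≤ w)]
        simp only [List.length_drop]
        omega
      simp only [pvAsect, if_pos (show xs.length ≠ 0 by omega)]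
      rw [ih _ f2' hdrop.1 hdrop.2]


-- one unfolding of the section builder under w ≥ 1, with canonical fuel
theorem pvAsect_cons (w : Int) (hw : 1 ≤ w) (xs : List String) (hxs : xs ≠ []) (f : Nat)
    (hf : xs.length ≤ f) :
    pvAsect w f xs =
      PySem.Str.join " " (xs.take w.toNat) ::
        pvAsect w (xs.drop w.toNat).length (xs.drop w.toNat) := by
  have hlen : 1 ≤ xs.length := List.length_pos_of_ne_nil hxs
  obtain ⟨f', rfl⟩ : ∃ f', f = f' + 1 := ⟨f - 1, by omega⟩
  simp only [pvAsect, if_pos (show xs.length ≠ 0 by omega)]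
  rw [PySem.List.slice_to xs (by omega : (0:Int) ≤ w),
      PySem.List.slice_from xs (by omega : (0:Int) ≤ w)]
  rw [pvAsect_fuel w hw f' (xs.drop w.toNat) (xs.drop w.toNat).length
      (by simp only [List.length_drop]; omega) le_rfl]

-- the B loop produces exactly the pairs of consecutive sections of the suffix
theorem pvBloop_spec (w : Int) (hw : 1 ≤ w) (words : List String) :
    ∀ (fuel : Nat) (i : Int) (prev : String) (acc : List String × List String),
      0 ≤ i → (words.drop i.toNat).length ≤ fuel →
      pvBloop w words fuel i prev acc =
        (acc.1 ++ (prev :: pvAsect w (words.drop i.toNat).length (words.drop i.toNat)).dropLast,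
         acc.2 ++ pvAsect w (words.drop i.toNat).length (words.drop i.toNat)) := by
  intro fuel
  induction fuel with
  | zero =>
    intro i prev acc _ hf
    have : words.drop i.toNat = [] := List.eq_nil_of_length_eq_zero (by omega)
    rw [this]
    simp [pvBloop, pvAsect_nil]
  | succ fuel ih =>
    intro i prev acc hi hf
    by_cases hlt : i < (words.length : Int)
    · have hitoNat : i.toNat < words.length := by omega
      have hne : words.drop i.toNat ≠ [] := by
        intro h
        have := congrArg List.length h
        simp only [List.length_drop, List.length_nil] at this
        omega
      have hiw : (i + w).toNat = i.toNat + w.toNat := by omega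
      have hcur : PySem.List.slice words (some i) (some (i + w))
          = (words.drop i.toNat).take w.toNat := by
        rw [PySem.List.slice_toNat words hi (by omega : (0:Int) ≤ i + w), hiw]
        simp
      have hdd : (words.drop i.toNat).drop w.toNat = words.drop (i + w).toNat := by
        rw [List.drop_drop, hiw, Nat.add_comm]
      simp only [pvBloop, if_pos hlt]
      rw [pvAsect_cons w hw (words.drop i.toNat) hne _ le_rfl, hdd, hcur]
      rw [ih (i + w) _ _ (by omega)
          (by simp only [List.length_drop, hiw]; simp only [List.length_drop] at hf; omega)]
      simp [List.append_assoc]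
    · have : words.drop i.toNat = [] := by
        apply List.eq_nil_of_length_eq_zero
        simp only [List.length_drop]
        omega
      rw [this]
      simp [pvBloop, if_neg hlt, pvAsect_nil]

-- A's pairing loop over range(len(s) - 1) appends dropLast s and tail s
theorem pvPair_fold (s : List String) (acc : List String × List String) :
    (PySem.List.pyRange 0 ((s.length : Int) - 1) 1).foldl
        (fun acc i =>
          (acc.1 ++ [PySem.List.pyGetD s i ""], acc.2 ++ [PySem.List.pyGetD s (i + 1) ""])) acc
      = (acc.1 ++ s.dropLast, acc.2 ++ s.tail) := by
  obtain ⟨a, b⟩ := acc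
  rw [PySem.List.foldl_prod_mk (f := fun acc i => acc ++ [PySem.List.pyGetD s i ""])
      (g := fun acc i => acc ++ [PySem.List.pyGetD s (i + 1) ""])]
  rw [PySem.List.foldl_append_singleton_eq_map, PySem.List.foldl_append_singleton_eq_map]
  by_cases hs : s = []
  · subst hs
    simp [PySem.List.pyRange_one_eq_nil (by omega : (-1:Int) ≤ 0)]
  · have hlen : 1 ≤ s.length := List.length_pos_of_ne_nil hs
    have h1 : ((s.length : Int) - 1) = ((s.dropLast.length : Int)) := by
      simp only [List.length_dropLast]; omega
    have h2 : ((s.length : Int) - 1) = ((s.tail.length : Int)) := by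
      simp only [List.length_tail]; omega
    have hmap1 : (PySem.List.pyRange 0 ((s.length : Int) - 1) 1).map
        (fun i => PySem.List.pyGetD s i "") = s.dropLast := by
      rw [h1, List.map_congr_left (g := fun i => PySem.List.pyGetD s.dropLast i "")]
      · exact PySem.List.map_pyGetD_pyRange_zero' s.dropLast ""
      · intro i hi
        rw [PySem.List.mem_pyRange_one] at hi
        have hi2 : i.toNat < s.dropLast.length := by simp only [List.length_dropLast]; omega
        have hilt : i < (s.length : Int) := by
          simp only [List.length_dropLast] at hi; omega
        rw [PySem.List.pyGetD_eq_getElem s "" hi.1 hilt,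
            PySem.List.pyGetD_eq_getElem s.dropLast "" hi.1 (by exact_mod_cast hi.2)]
        exact (List.getElem_dropLast hi2).symm
    have hmap2 : (PySem.List.pyRange 0 ((s.length : Int) - 1) 1).map
        (fun i => PySem.List.pyGetD s (i + 1) "") = s.tail := by
      rw [h2, List.map_congr_left (g := fun i => PySem.List.pyGetD s.tail i "")]
      · exact PySem.List.map_pyGetD_pyRange_zero' s.tail ""
      · intro i hi
        rw [PySem.List.mem_pyRange_one] at hi
        have hi2 : i.toNat < s.tail.length := by simp only [List.length_tail]; omega
        have h3 : (i + 1).toNat = i.toNat + 1 := by omega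
        have hilt : i + 1 < (s.length : Int) := by
          simp only [List.length_tail] at hi; omega
        rw [PySem.List.pyGetD_eq_getElem s "" (by omega : (0:Int) ≤ i + 1) hilt,
            PySem.List.pyGetD_eq_getElem s.tail "" hi.1 (by exact_mod_cast hi.2)]
        simp only [h3]
        exact (List.getElem_tail hi2).symm
    rw [hmap1, hmap2]

-- per-text bodies agree under w ≥ 1
theorem pvBody_eq (w : Int) (hw : 1 ≤ w) (data : String) (acc : List String × List String) :
    (let groups := (PySem.Str.split? data " ").getD []
     let s := pvAsect w (groups.length + 1) groups
     (PySem.List.pyRange 0 ((s.length : Int) - 1) 1).foldl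
       (fun acc i =>
         (acc.1 ++ [PySem.List.pyGetD s i ""], acc.2 ++ [PySem.List.pyGetD s (i + 1) ""])) acc)
    = (let words := (PySem.Str.split? data " ").getD []
       let prev := PySem.Str.join " " (PySem.List.slice words none (some w))
       pvBloop w words words.length w prev acc) := by
  simp only
  generalize (PySem.Str.split? data " ").getD [] = ws
  by_cases hws : ws = []
  · subst hws
    simp [pvAsect_nil, pvBloop, PySem.List.pyRange_one_eq_nil (show (-1:Int) ≤ 0 by omega)]
  · rw [pvPair_fold]
    rw [PySem.List.slice_to ws (by omega : (0:Int) ≤ w)]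
    rw [pvBloop_spec w hw ws ws.length w _ acc (by omega)
        (by simp only [List.length_drop]; omega)]
    rw [pvAsect_cons w hw ws hws (ws.length + 1) (by omega)]
    simp

-- ===== VERDICT (by name: the statement is the Claim_ definition above) =====
theorem split_input_output_spec : Claim_equal_split_input_output := by
  intro all_data w _ hpre
  unfold Spec_split_input_output
  rcases hpre with hw | hnil
  · unfold split_input_output split_input_output_alt
    apply PySem.List.foldl_congr_mem
    intro acc data _
    exact pvBody_eq w hw data acc
  · subst hnil; rfl
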